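-- pv_equiv track=rewrite | github.com/HiteshAdari/DSApractice | CP/CC54div4.py | eqdis
-- ===== SOURCE A (Python) =====
-- def hashm(lis):
--     x = {}
--     for ele in lis:
--         if ele in x:
--             x[ele] += 1
--         else:
--             x[ele] = 1
--     return x
--
-- def eqdis(lis, n):
--     switch = 1
--     b = []
--     c = []
--     has = hashm(lis)
--     if len(has)%2 == 0:
--         return True
--     else:
--         for ele in has:
--             if has[ele]%2 ==0:
--                 return True
--         return False
--     '''
--     for ele in has:
--         if has[ele] % 2 == 0:
--             #for i in range(int(has[ele] / 2)):
--             b.append(ele)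
--             c.append(ele)
--             has[ele] = 0
--         elif has[ele] == 1:
--             if switch == 1:
--                 b.append(ele)
--                 switch = 0
--             else:
--                 c.append(ele)
--                 switch = 1
--             has[ele] = 0
--         elif has[ele] / 2 > 1:
--             #for i in range(has[ele] // 2):
--             b.append(ele)
--             c.append(ele)
--             has[ele] = 0
--     '''
--     '''    for ele in has:
--         if has[ele] == 1:
--             if switch == 1:
--                 b.append(ele)
--                 switch = 0
--             else:
--                 c.append(ele)
--                 switch = 1
--     '''
--     '''
--     if len(hashm(b)) == len(hashm(c)):
--         return True
--     else:
--         return False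
--     '''
-- ===== SOURCE B (Python) =====
-- def eqdis(lis, n):
--     seen = set()
--     odd = set()
--     for e in lis:
--         seen.add(e)
--         if e in odd:
--             odd.discard(e)
--         else:
--             odd.add(e)
--     return len(seen) % 2 == 0 or len(odd) < len(seen)
-- ===== Notes on version B (the rewrite author's own statement) =====
-- stated objective: alternative
-- what changed: Replaces the count dictionary plus parity scan over its entries by a single streaming pass keeping two sets (seen, and odd-so-far toggled per occurrence); 'some even frequency exists' becomes len(odd) < len(seen), no integer counts stored.
import Mathlib
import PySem

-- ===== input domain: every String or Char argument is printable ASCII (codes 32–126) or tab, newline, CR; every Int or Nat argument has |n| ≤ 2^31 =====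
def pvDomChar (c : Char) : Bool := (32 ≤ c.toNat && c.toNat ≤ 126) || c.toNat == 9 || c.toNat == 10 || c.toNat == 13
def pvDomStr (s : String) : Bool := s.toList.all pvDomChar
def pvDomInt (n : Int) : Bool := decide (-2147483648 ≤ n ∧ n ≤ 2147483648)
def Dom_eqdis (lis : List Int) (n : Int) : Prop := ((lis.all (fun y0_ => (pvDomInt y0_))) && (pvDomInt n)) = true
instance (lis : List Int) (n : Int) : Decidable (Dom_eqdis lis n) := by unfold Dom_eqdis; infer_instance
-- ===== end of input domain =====

-- B replaces A's count dictionary + parity scan by one streaming pass over two sets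
-- (seen / odd-occurrences-so-far); same return value, no integer counts stored.

-- ===== PORT A =====
-- helper hashm: build the count dict by a loop over lis
def hashmA (lis : List Int) : PySem.Dict Int Int :=
  lis.foldl (fun x ele =>
    if x.contains ele then x.modify ele 0 (· + 1) else x.insert ele 1)
    PySem.Dict.empty

def eqdis (lis : List Int) (n : Int) : Bool :=
  let has := hashmA lis
  if PySem.Dict.size has % 2 == 0 then
    true
  else
    -- 'for ele in has: if has[ele] % 2 == 0: return True' then 'return False'
    has.keys.any (fun ele => PySem.Int.mod (has.getD ele 0) 2 == 0)

-- ===== PORT B =====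
def eqdis_alt (lis : List Int) (n : Int) : Bool :=
  let p := lis.foldl (fun (p : PySem.Set Int × PySem.Set Int) e =>
    (PySem.Set.add p.1 e,
     if PySem.Set.contains p.2 e then PySem.Set.discard p.2 e else PySem.Set.add p.2 e))
    ([], [])
  PySem.Int.mod (PySem.Set.len p.1) 2 == 0 || decide (PySem.Set.len p.2 < PySem.Set.len p.1)

-- ===== PRECONDITION & SPEC =====
def Spec_eqdis (lis : List Int) (n : Int) (out : Bool) : Prop := out = eqdis_alt lis n
instance (lis : List Int) (n : Int) (out : Bool) : Decidable (Spec_eqdis lis n out) := by unfold Spec_eqdis; infer_instance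

-- ===== CLAIM (what is proved, stated in full; the proofs are below) =====
def Claim_equal_eqdis : Prop := ∀ (lis : List Int) (n : Int), Dom_eqdis lis n → Spec_eqdis lis n (eqdis lis n)

-- ===== LEMMAS AND PROOFS =====

-- A's dict-building step is exactly Counter's step
theorem hashmA_step (d : PySem.Dict Int Int) (e : Int) :
    (if d.contains e then d.modify e 0 (· + 1) else d.insert e 1) = d.modify e 0 (· + 1) := by
  by_cases h : d.contains e
  · simp [h]
  · have hf : d.contains e = false := by simpa using h
    simp [h, PySem.Dict.modify, PySem.Dict.insert, PySem.Dict.getD_of_not_contains _ 0 hf]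

theorem hashmA_eq_counter (lis : List Int) : hashmA lis = PySem.Dict.counter lis := by
  unfold hashmA
  rw [PySem.Dict.counter_eq_foldl]
  congr 1
  funext d e
  exact hashmA_step d e

-- B's toggle set: membership ↔ even count so far of everything seen
def toggle (o : PySem.Set Int) (e : Int) : PySem.Set Int :=
  if PySem.Set.contains o e then PySem.Set.discard o e else PySem.Set.add o e

theorem mem_foldl_toggle (lis : List Int) (o : PySem.Set Int) (x : Int) :
    x ∈ lis.foldl toggle o ↔ ((x ∈ o) ↔ lis.count x % 2 = 0) := by
  induction lis generalizing o with
  | nil => simp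
  | cons e t ih =>
    simp only [List.foldl_cons, ih, List.count_cons]
    by_cases hx : x = e
    · subst hx
      by_cases h : x ∈ o <;>
        simp [toggle, h, PySem.Set.mem_discard] <;> omega
    · have hmem : x ∈ toggle o e ↔ x ∈ o := by
        by_cases h : e ∈ o <;>
          simp [toggle, h, PySem.Set.mem_discard, hx]
      rw [hmem]
      simp [Ne.symm hx]

theorem nodup_foldl_toggle (lis : List Int) (o : PySem.Set Int) (h : o.Nodup) :
    (lis.foldl toggle o).Nodup := by
  induction lis generalizing o with
  | nil => exact h
  | cons e t ih =>
    refine ih _ ?_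
    by_cases hc : PySem.Set.contains o e
    · rw [show toggle o e = PySem.Set.discard o e from if_pos hc]
      exact PySem.Set.nodup_discard o e h
    · rw [show toggle o e = PySem.Set.add o e from if_neg hc]
      exact PySem.Set.nodup_add o e h

theorem eqdis_spec' (lis : List Int) (n : Int) : eqdis lis n = eqdis_alt lis n := by
  unfold eqdis eqdis_alt
  simp only []
  simp only [PySem.List.foldl_prod_mk (fun (s : PySem.Set Int) e => PySem.Set.add s e)
    (fun (s : PySem.Set Int) e => if PySem.Set.contains s e then PySem.Set.discard s e else PySem.Set.add s e)]
  rw [← PySem.Set.ofList_eq_foldl]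
  rw [hashmA_eq_counter]
  have hkeys := PySem.Dict.keys_counter lis
  set S : PySem.Set Int := PySem.Set.ofList lis with hS
  set O : List Int := lis.foldl (fun o e =>
      if PySem.Set.contains o e then PySem.Set.discard o e else PySem.Set.add o e) [] with hO
  have hOt : O = lis.foldl toggle [] := rfl
  have hnodS : S.Nodup := PySem.Set.nodup_ofList lis
  have hnodO : O.Nodup := by rw [hOt]; exact nodup_foldl_toggle lis [] List.nodup_nil
  have hmemO : ∀ x, x ∈ O ↔ x ∈ lis ∧ lis.count x % 2 = 1 := by
    intro x
    rw [hOt, mem_foldl_toggle]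
    constructor
    · intro h
      have h1 : ¬ (lis.count x % 2 = 0) := by simpa using h
      have hc : 0 < lis.count x := by
        by_contra hc
        exact h1 (by simp [Nat.eq_zero_of_not_pos hc])
      exact ⟨List.count_pos_iff.mp hc, by omega⟩
    · intro ⟨_, h2⟩
      simp; omega
  have hsub : O ⊆ S := by
    intro x hx
    rw [hS, PySem.Set.mem_ofList]
    exact ((hmemO x).mp hx).1
  have hsize : PySem.Dict.size (PySem.Dict.counter lis) = S.length := by
    have h1 : (PySem.Dict.counter lis).keys.length = S.length := by rw [hkeys]
    simpa [PySem.Dict.keys, PySem.Dict.size] using h1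
  have hlenS : PySem.Set.len S = (S.length : Int) := rfl
  have hlenO : PySem.Set.len O = (O.length : Int) := rfl
  have hOle : O.length ≤ S.length := (List.Nodup.subperm hnodO hsub).length_le
  -- the parity-of-distinct disjunct agrees
  have hmod : (PySem.Int.mod (PySem.Set.len S) 2 == 0) = (PySem.Dict.size (PySem.Dict.counter lis) % 2 == 0) := by
    rw [hlenS, hsize]
    have h2 : PySem.Int.mod (S.length : Int) 2 = ((S.length % 2 : Nat) : Int) := by
      exact_mod_cast PySem.Int.mod_natCast S.length 2
    rw [h2]
    simp
    omega
  -- the any-even-count scan agrees with len O < len S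
  have hany : ((PySem.Dict.counter lis).keys.any
      (fun ele => PySem.Int.mod ((PySem.Dict.counter lis).getD ele 0) 2 == 0)) =
      decide (PySem.Set.len O < PySem.Set.len S) := by
    rw [hkeys, hlenS, hlenO]
    rcases Nat.lt_or_ge O.length S.length with hlt | hge
    · have hne : ¬ S ⊆ O := by
        intro hsub'
        have := (List.Nodup.subperm hnodS hsub').length_le
        omega
      rw [List.subset_def] at hne
      push Not at hne
      obtain ⟨x, hxS, hxO⟩ := hne
      have hxlis : x ∈ lis := (PySem.Set.mem_ofList lis x).mp hxS
      have heven : lis.count x % 2 = 0 := by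
        by_contra h
        exact hxO ((hmemO x).mpr ⟨hxlis, by omega⟩)
      have htrue : S.any (fun ele => PySem.Int.mod ((PySem.Dict.counter lis).getD ele 0) 2 == 0) = true := by
        rw [List.any_eq_true]
        refine ⟨x, hxS, ?_⟩
        rw [PySem.Dict.getD_counter]
        have h2 : PySem.Int.mod ((lis.count x : Nat) : Int) 2 = ((lis.count x % 2 : Nat) : Int) := by
          exact_mod_cast PySem.Int.mod_natCast (lis.count x) 2
        rw [h2, heven]
        simp
      rw [htrue]
      simp [Nat.cast_lt, hlt]
    · have hperm : O.Perm S :=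
        (List.Nodup.subperm hnodO hsub).perm_of_length_le (by omega)
      have hfalse : S.any (fun ele => PySem.Int.mod ((PySem.Dict.counter lis).getD ele 0) 2 == 0) = false := by
        rw [List.any_eq_false]
        intro x hxS
        have hxO : x ∈ O := hperm.mem_iff.mpr hxS
        have hodd : lis.count x % 2 = 1 := ((hmemO x).mp hxO).2
        rw [PySem.Dict.getD_counter]
        have h2 : PySem.Int.mod ((lis.count x : Nat) : Int) 2 = ((lis.count x % 2 : Nat) : Int) := by
          exact_mod_cast PySem.Int.mod_natCast (lis.count x) 2
        rw [h2, hodd]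
        simp
      rw [hfalse]
      have : ¬ ((O.length : Int) < (S.length : Int)) := by
        rw [Nat.cast_lt]; omega
      simp [this]
  rw [hmod, hany]
  by_cases h : (PySem.Dict.size (PySem.Dict.counter lis) % 2 == 0) = true
  · simp [h]
  · simp [h]

-- ===== VERDICT (by name: the statement is the Claim_ definition above) =====
theorem eqdis_spec : Claim_equal_eqdis := by
  intro lis n _
  unfold Spec_eqdis
  exact eqdis_spec' lis n
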